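-- pv_equiv track=rewrite | github.com/czyalex/4003 | scripts/interim/filter_gene_hpo_by_hpo_kind.py | is_descendant_of
-- ===== SOURCE A (Python) =====
-- from collections import defaultdict, deque
--
-- def is_descendant_of(parents, node, root):
--     # BFS to root
--     q = deque([node]); seen=set()
--     while q:
--         x = q.popleft()
--         if x in seen: continue
--         seen.add(x)
--         if x == root: return True
--         for p in parents.get(x,[]):
--             q.append(p)
--     return False
-- ===== SOURCE B (Python) =====
-- def is_descendant_of(parents, node, root):
--     # Recursive depth-first search with a shared visited set (instead of A's BFS queue).
--     def dfs(x, visited):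
--         if x == root:
--             return True
--         visited.add(x)
--         return any(dfs(p, visited) for p in parents.get(x, []) if p not in visited)
--     return dfs(node, set())
-- ===== Notes on version B (the rewrite author's own statement) =====
-- stated objective: alternative
-- what changed: Replaced the iterative breadth-first search with an explicit deque and seen-set by a recursive depth-first search with a shared visited set threaded through the recursion.
import Mathlib
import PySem

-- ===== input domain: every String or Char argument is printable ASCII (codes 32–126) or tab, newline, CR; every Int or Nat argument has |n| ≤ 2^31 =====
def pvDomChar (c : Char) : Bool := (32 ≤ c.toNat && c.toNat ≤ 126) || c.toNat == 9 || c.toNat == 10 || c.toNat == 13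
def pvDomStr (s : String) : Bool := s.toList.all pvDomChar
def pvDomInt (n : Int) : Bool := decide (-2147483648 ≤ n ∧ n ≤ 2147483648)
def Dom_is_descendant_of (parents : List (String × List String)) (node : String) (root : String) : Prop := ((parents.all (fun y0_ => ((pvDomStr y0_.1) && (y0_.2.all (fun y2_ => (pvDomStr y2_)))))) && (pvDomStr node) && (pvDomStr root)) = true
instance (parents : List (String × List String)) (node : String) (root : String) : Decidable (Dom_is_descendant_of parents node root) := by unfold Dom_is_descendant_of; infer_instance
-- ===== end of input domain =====

-- B replaces A's queue-based breadth-first search by a recursive depth-first search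
-- with a shared visited set (objective: alternative decomposition, same exact result).

-- parents.get(x, []) — dict lookup, first match on the association list (the type convention's dict semantics)
def pvGet (parents : List (String × List String)) (x : String) : List String :=
  match parents.find? (fun kv => kv.1 == x) with
  | some kv => kv.2
  | none => []

-- ===== PORT A =====
-- the finite universe of strings that can ever enter the queue / the visited set, and the
-- total size of all parent lists; both only feed the fuel bound that makes the loop total
def pvUniv (parents : List (String × List String)) (node : String) : List String :=
  node :: parents.flatMap (fun kv => kv.2)

def pvS (parents : List (String × List String)) : Nat :=
  (parents.map (fun kv => kv.2.length)).sum

-- the BFS while-loop of A: pop front, skip seen, mark, test root, enqueue parents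
def bfsLoop (parents : List (String × List String)) (root : String) :
    Nat → List String → List String → Bool
  | 0, _, _ => false
  | _ + 1, [], _ => false
  | f + 1, x :: q', seen =>
    if x ∈ seen then bfsLoop parents root f q' seen
    else
      let seen1 := PySem.Set.add seen x
      if x = root then true
      else bfsLoop parents root f (q' ++ pvGet parents x) seen1

def is_descendant_of (parents : List (String × List String)) (node : String) (root : String) : Bool :=
  bfsLoop parents root (2 + (1 + pvS parents) * (pvUniv parents node).length) [node] []

-- ===== PORT B =====
-- dfs(x, visited) / the any(...) generator of Source B, visited threaded through the calls
mutual
  def dfsGo (parents : List (String × List String)) (root : String) :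
      Nat → String → List String → Bool × List String
    | 0, _, vis => (false, vis)
    | f + 1, x, vis =>
      if x = root then (true, vis)
      else anyGo parents root f (pvGet parents x) (PySem.Set.add vis x)
  termination_by f _ _ => (f, 0)

  def anyGo (parents : List (String × List String)) (root : String) :
      Nat → List String → List String → Bool × List String
    | _, [], vis => (false, vis)
    | f, p :: ps, vis =>
      if vis.contains p then anyGo parents root f ps vis
      else
        match dfsGo parents root f p vis with
        | (true, v1) => (true, v1)
        | (false, v1) => anyGo parents root f ps v1
  termination_by f ps _ => (f, ps.length + 1)
end

def is_descendant_of_alt (parents : List (String × List String)) (node : String) (root : String) : Bool :=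
  (dfsGo parents root ((pvUniv parents node).length + 1) node []).1

-- ===== PRECONDITION & SPEC =====
def Spec_is_descendant_of (parents : List (String × List String)) (node : String) (root : String) (out : Bool) : Prop := out = is_descendant_of_alt parents node root
instance (parents : List (String × List String)) (node : String) (root : String) (out : Bool) : Decidable (Spec_is_descendant_of parents node root out) := by unfold Spec_is_descendant_of; infer_instance

-- ===== CLAIM (what is proved, stated in full; the proofs are below) =====
def Claim_equal_is_descendant_of : Prop := ∀ (parents : List (String × List String)) (node : String) (root : String), Dom_is_descendant_of parents node root → Spec_is_descendant_of parents node root (is_descendant_of parents node root)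

-- ===== LEMMAS AND PROOFS =====

-- root is reachable from x along parent edges by a path avoiding vis (except at root itself)
inductive pvReach (parents : List (String × List String)) (root : String)
    (vis : List String) : String → Prop
  | base : pvReach parents root vis root
  | step (x p : String) (hx : x ∉ vis) (hp : p ∈ pvGet parents x)
      (h : pvReach parents root vis p) : pvReach parents root vis x

-- remaining budget: members of the universe not yet visited
def pvM (Uu vis : List String) : Nat :=
  (Uu.filter (fun a => decide (a ∉ vis))).length

theorem pvReach_anti (parents : List (String × List String)) (root : String)
    {vis vis' : List String} (hsub : vis ⊆ vis') {x : String}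
    (h : pvReach parents root vis' x) : pvReach parents root vis x := by
  induction h with
  | base => exact pvReach.base
  | step y p hy hp _ ih => exact pvReach.step y p (fun hmem => hy (hsub hmem)) hp ih

theorem pvReach_not_root_not_mem (parents : List (String × List String)) (root : String)
    {vis : List String} {x : String} (h : pvReach parents root vis x) :
    x = root ∨ x ∉ vis := by
  cases h with
  | base => exact Or.inl rfl
  | step _ p hy hp h => exact Or.inr hy

-- shifting the avoided set by one freshly visited vertex a
theorem pvReach_avoid (parents : List (String × List String)) (root : String)
    {vis vis' : List String} {a : String}
    (hmem : ∀ z, z ∈ vis' ↔ z = a ∨ z ∈ vis) {y : String}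
    (h : pvReach parents root vis y) :
    pvReach parents root vis' y ∨ ∃ p ∈ pvGet parents a, pvReach parents root vis' p := by
  induction h with
  | base => exact Or.inl pvReach.base
  | step y p hy hp _ ih =>
    rcases ih with ih | ih
    · by_cases hya : y = a
      · exact Or.inr ⟨p, hya ▸ hp, ih⟩
      · refine Or.inl (pvReach.step y p ?_ hp ih)
        intro hmem'
        rcases (hmem y).1 hmem' with h1 | h1
        · exact hya h1
        · exact hy h1
    · exact Or.inr ih

-- a closed set of non-root vertices traps reachability
theorem pvReach_closed (parents : List (String × List String)) (root : String)
    {V : List String} (hclosed : ∀ v ∈ V, ∀ p ∈ pvGet parents v, p ∈ V)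
    (hroot : root ∉ V) {vis : List String} {y : String}
    (h : pvReach parents root vis y) : y ∉ V := by
  induction h with
  | base => exact hroot
  | step y p _ hp _ ih =>
    intro hyV
    exact ih (hclosed y hyV p hp)

theorem pvM_mono {Uu vis vis' : List String} (h : vis ⊆ vis') :
    pvM Uu vis' ≤ pvM Uu vis := by
  unfold pvM
  refine List.Sublist.length_le (List.monotone_filter_right Uu ?_)
  intro a ha
  simp only [decide_eq_true_eq] at ha ⊢
  exact fun hmem => ha (h hmem)

theorem pvM_pos {Uu vis : List String} {x : String} (hxU : x ∈ Uu) (hxv : x ∉ vis) :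
    0 < pvM Uu vis := by
  unfold pvM
  refine List.length_pos_of_mem (a := x) ?_
  simp [List.mem_filter, hxU, hxv]

theorem pvM_add_lt {Uu : List String} (vis : List String) {x : String}
    (hxU : x ∈ Uu) (hxv : x ∉ vis) :
    pvM Uu (vis ++ [x]) < pvM Uu vis := by
  induction Uu with
  | nil => cases hxU
  | cons a l ih =>
    unfold pvM
    rw [List.filter_cons, List.filter_cons]
    by_cases hax : a = x
    · subst hax
      have h1 : (decide (a ∉ vis ++ [a])) = false := by simp
      have h2 : (decide (a ∉ vis)) = true := by simp [hxv]
      have hmono := pvM_mono (Uu := l)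
        (vis := vis) (vis' := vis ++ [a]) (fun z hz => List.mem_append_left _ hz)
      unfold pvM at hmono
      rw [h1, h2]
      simp only [Bool.false_eq_true, if_false, if_true, List.length_cons]
      omega
    · have hxl : x ∈ l := by
        rcases List.mem_cons.1 hxU with h | h
        · exact absurd h.symm hax
        · exact h
      have ihl := ih hxl
      unfold pvM at ihl
      have hcond : (decide (a ∉ vis ++ [x])) = (decide (a ∉ vis)) := by
        by_cases hav : a ∈ vis <;> simp [List.mem_append, hav, hax]
      rw [hcond]
      split <;> (all_goals try simp only [List.length_cons]) <;> omega

theorem pvM_le_length (Uu vis : List String) : pvM Uu vis ≤ Uu.length :=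
  List.length_filter_le _ _

theorem pvGet_sub_univ (parents : List (String × List String)) (node : String)
    {x p : String} (hp : p ∈ pvGet parents x) : p ∈ pvUniv parents node := by
  unfold pvGet at hp
  unfold pvUniv
  cases hfind : parents.find? (fun kv => kv.1 == x) with
  | none => rw [hfind] at hp; cases hp
  | some kv =>
    rw [hfind] at hp
    have hkv := List.mem_of_find?_eq_some hfind
    exact List.mem_cons_of_mem _ (List.mem_flatMap.2 ⟨kv, hkv, hp⟩)

theorem pvGet_len_le (parents : List (String × List String)) (x : String) :
    (pvGet parents x).length ≤ pvS parents := by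
  unfold pvGet pvS
  cases hfind : parents.find? (fun kv => kv.1 == x) with
  | none => simp
  | some kv =>
    have hkv := List.mem_of_find?_eq_some hfind
    have : kv.2.length ∈ parents.map (fun kv => kv.2.length) := List.mem_map_of_mem hkv
    exact List.le_sum_of_mem this

-- membership in PySem.Set.add
theorem set_add_mem (vis : List String) (x : String) (z : String) :
    z ∈ PySem.Set.add vis x ↔ z = x ∨ z ∈ vis := by
  rw [PySem.Set.mem_add]; tauto

theorem set_add_eq_append {vis : List String} {x : String} (hxv : x ∉ vis) :
    PySem.Set.add vis x = vis ++ [x] := by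
  unfold PySem.Set.add
  simp [hxv]

-- ===== the BFS loop computes reachability =====
theorem bfsLoop_iff (parents : List (String × List String)) (root node : String) :
    ∀ (f : Nat) (q seen : List String),
      (∀ y ∈ q, y ∈ pvUniv parents node) →
      (∀ v ∈ seen, ∀ p ∈ pvGet parents v, p ∈ seen ∨ p ∈ q) →
      root ∉ seen →
      q.length + (1 + pvS parents) * pvM (pvUniv parents node) seen + 1 ≤ f →
      (bfsLoop parents root f q seen = true ↔ ∃ x ∈ q, pvReach parents root seen x) := by
  intro f
  induction f with
  | zero => intro q seen _ _ _ hfuel; omega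
  | succ f ih =>
    intro q seen hq hcl hroot hfuel
    cases q with
    | nil =>
      simp [bfsLoop]
    | cons x q' =>
      by_cases hxs : x ∈ seen
      · have heq : bfsLoop parents root (f + 1) (x :: q') seen = bfsLoop parents root f q' seen := by
          simp [bfsLoop, hxs]
        rw [heq]
        have hq' : ∀ y ∈ q', y ∈ pvUniv parents node := fun y hy => hq y (List.mem_cons_of_mem _ hy)
        have hcl' : ∀ v ∈ seen, ∀ p ∈ pvGet parents v, p ∈ seen ∨ p ∈ q' := by
          intro v hv p hp
          rcases hcl v hv p hp with h | h
          · exact Or.inl h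
          · rcases List.mem_cons.1 h with h | h
            · exact Or.inl (h ▸ hxs)
            · exact Or.inr h
        have hfuel' : q'.length + (1 + pvS parents) * pvM (pvUniv parents node) seen + 1 ≤ f := by
          simp only [List.length_cons] at hfuel; omega
        rw [ih q' seen hq' hcl' hroot hfuel']
        constructor
        · rintro ⟨y, hy, hr⟩; exact ⟨y, List.mem_cons_of_mem _ hy, hr⟩
        · rintro ⟨y, hy, hr⟩
          rcases List.mem_cons.1 hy with hy | hy
          · subst hy
            rcases pvReach_not_root_not_mem parents root hr with h | h
            · exact absurd (h ▸ hxs) hroot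
            · exact absurd hxs h
          · exact ⟨y, hy, hr⟩
      · by_cases hxr : x = root
        · have heq : bfsLoop parents root (f + 1) (x :: q') seen = true := by
            subst hxr; simp [bfsLoop, hxs]
          rw [heq]
          constructor
          · intro _; exact ⟨x, List.mem_cons_self, hxr ▸ pvReach.base⟩
          · intro _; rfl
        · -- pop x, mark it, enqueue its parents
          have heq : bfsLoop parents root (f + 1) (x :: q') seen =
              bfsLoop parents root f (q' ++ pvGet parents x) (PySem.Set.add seen x) := by
            simp [bfsLoop, hxs, hxr]
          rw [heq]
          have hadd : ∀ z, z ∈ PySem.Set.add seen x ↔ z = x ∨ z ∈ seen := set_add_mem seen x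
          have hxU : x ∈ pvUniv parents node := hq x List.mem_cons_self
          have hseen1_eq : PySem.Set.add seen x = seen ++ [x] := set_add_eq_append hxs
          have hq2 : ∀ y ∈ q' ++ pvGet parents x, y ∈ pvUniv parents node := by
            intro y hy
            rcases List.mem_append.1 hy with h | h
            · exact hq y (List.mem_cons_of_mem _ h)
            · exact pvGet_sub_univ parents node h
          have hcl2 : ∀ v ∈ PySem.Set.add seen x, ∀ p ∈ pvGet parents v,
              p ∈ PySem.Set.add seen x ∨ p ∈ q' ++ pvGet parents x := by
            intro v hv p hp
            rcases (hadd v).1 hv with hv1 | hv1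
            · subst hv1
              exact Or.inr (List.mem_append_right _ hp)
            · rcases hcl v hv1 p hp with h | h
              · exact Or.inl ((hadd p).2 (Or.inr h))
              · rcases List.mem_cons.1 h with h | h
                · exact Or.inl ((hadd p).2 (Or.inl h))
                · exact Or.inr (List.mem_append_left _ h)
          have hroot2 : root ∉ PySem.Set.add seen x := by
            intro hmem
            rcases (hadd root).1 hmem with h | h
            · exact hxr h.symm
            · exact hroot h
          have hfuel2 : (q' ++ pvGet parents x).length +
              (1 + pvS parents) * pvM (pvUniv parents node) (PySem.Set.add seen x) + 1 ≤ f := by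
            rw [hseen1_eq]
            have hlt : pvM (pvUniv parents node) (seen ++ [x]) < pvM (pvUniv parents node) seen :=
              pvM_add_lt seen hxU hxs
            have hglen : (pvGet parents x).length ≤ pvS parents := pvGet_len_le parents x
            set M := pvM (pvUniv parents node) seen with hM
            set M1 := pvM (pvUniv parents node) (seen ++ [x]) with hM1
            have hmul : (1 + pvS parents) * (M1 + 1) ≤ (1 + pvS parents) * M :=
              Nat.mul_le_mul_left _ hlt
            rw [Nat.mul_add, Nat.mul_one] at hmul
            simp only [List.length_append, List.length_cons] at hfuel ⊢
            omega
          rw [ih _ _ hq2 hcl2 hroot2 hfuel2]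
          constructor
          · rintro ⟨y, hy, hr⟩
            rcases List.mem_append.1 hy with h | h
            · refine ⟨y, List.mem_cons_of_mem _ h, ?_⟩
              refine pvReach_anti parents root ?_ hr
              intro z hz; exact (hadd z).2 (Or.inr hz)
            · refine ⟨x, List.mem_cons_self, ?_⟩
              refine pvReach.step x y hxs h ?_
              refine pvReach_anti parents root ?_ hr
              intro z hz; exact (hadd z).2 (Or.inr hz)
          · rintro ⟨y, hy, hr⟩
            rcases List.mem_cons.1 hy with hy | hy
            · subst hy
              cases hr with
              | base => exact absurd rfl hxr
              | step _ p hy2 hp hr2 =>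
                rcases pvReach_avoid parents root hadd hr2 with h | h
                · exact ⟨p, List.mem_append_right _ hp, h⟩
                · obtain ⟨p', hp', hr'⟩ := h
                  exact ⟨p', List.mem_append_right _ hp', hr'⟩
            · rcases pvReach_avoid parents root hadd hr with h | h
              · exact ⟨y, List.mem_append_left _ hy, h⟩
              · obtain ⟨p', hp', hr'⟩ := h
                exact ⟨p', List.mem_append_right _ hp', hr'⟩

-- ===== the DFS pair computes reachability =====
-- joint induction statements for dfsGo / anyGo
def DfsOk (parents : List (String × List String)) (root : String) (Uu : List String) (f : Nat) : Prop :=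
  ∀ (x : String) (vis : List String) (b : Bool) (V : List String),
    x ∈ Uu → x ∉ vis → root ∉ vis → pvM Uu vis ≤ f →
    dfsGo parents root f x vis = (b, V) →
    vis ⊆ V ∧ root ∉ V ∧
    (b = true → pvReach parents root vis x) ∧
    (b = false → x ∈ V ∧ ∀ v ∈ V, v ∉ vis → ∀ p ∈ pvGet parents v, p ∈ V)

def AnyOk (parents : List (String × List String)) (root : String) (Uu : List String) (f : Nat) : Prop :=
  ∀ (ps : List String) (vis : List String) (b : Bool) (V : List String),
    (∀ p ∈ ps, p ∈ Uu) → root ∉ vis → pvM Uu vis ≤ f →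
    anyGo parents root f ps vis = (b, V) →
    vis ⊆ V ∧ root ∉ V ∧
    (b = true → ∃ p ∈ ps, pvReach parents root vis p) ∧
    (b = false → (∀ p ∈ ps, p ∈ V) ∧ ∀ v ∈ V, v ∉ vis → ∀ p ∈ pvGet parents v, p ∈ V)

theorem any_of_dfs (parents : List (String × List String)) (root : String) (Uu : List String)
    (f : Nat) (hd : DfsOk parents root Uu f) : AnyOk parents root Uu f := by
  intro ps
  induction ps with
  | nil =>
    intro vis b V _ hroot _ heq
    simp only [anyGo] at heq
    cases heq
    refine ⟨fun z hz => hz, hroot, by simp, fun _ => ⟨by simp, ?_⟩⟩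
    intro v hv hv2 q hq
    exact absurd hv hv2
  | cons p ps ihps =>
    intro vis b V hps hroot hfuel heq
    by_cases hpv : p ∈ vis
    · have hc : vis.contains p = true := by simp [List.contains_eq_mem, hpv]
      simp only [anyGo] at heq
      rw [if_pos hc] at heq
      obtain ⟨h1, h2, h3, h4⟩ := ihps vis b V (fun q hq => hps q (List.mem_cons_of_mem _ hq)) hroot hfuel heq
      refine ⟨h1, h2, ?_, ?_⟩
      · intro hb; obtain ⟨q, hq, hr⟩ := h3 hb; exact ⟨q, List.mem_cons_of_mem _ hq, hr⟩
      · intro hb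
        obtain ⟨ha, hb2⟩ := h4 hb
        refine ⟨?_, hb2⟩
        intro q hq
        rcases List.mem_cons.1 hq with hq | hq
        · exact h1 (hq ▸ hpv)
        · exact ha q hq
    · have hc : vis.contains p = false := by simp [List.contains_eq_mem, hpv]
      have hcn : ¬ (vis.contains p = true) := by rw [hc]; simp
      simp only [anyGo] at heq
      rw [if_neg hcn] at heq
      cases hdfs : dfsGo parents root f p vis with
      | mk b1 v1 =>
        have hpU : p ∈ Uu := hps p List.mem_cons_self
        obtain ⟨hd1, hd2, hd3, hd4⟩ := hd p vis b1 v1 hpU hpv hroot hfuel hdfs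
        cases b1 with
        | true =>
          rw [hdfs] at heq
          simp only at heq
          cases heq
          exact ⟨hd1, hd2, fun _ => ⟨p, List.mem_cons_self, hd3 rfl⟩, by intro h; cases h⟩
        | false =>
          rw [hdfs] at heq
          simp only at heq
          obtain ⟨hpv1, hclosed1⟩ := hd4 rfl
          have hfuel1 : pvM Uu v1 ≤ f := le_trans (pvM_mono hd1) hfuel
          obtain ⟨h1, h2, h3, h4⟩ := ihps v1 b V (fun q hq => hps q (List.mem_cons_of_mem _ hq)) hd2 hfuel1 heq
          refine ⟨fun z hz => h1 (hd1 hz), h2, ?_, ?_⟩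
          · intro hb
            obtain ⟨q, hq, hr⟩ := h3 hb
            exact ⟨q, List.mem_cons_of_mem _ hq, pvReach_anti parents root hd1 hr⟩
          · intro hb
            obtain ⟨ha, hb2⟩ := h4 hb
            refine ⟨?_, ?_⟩
            · intro q hq
              rcases List.mem_cons.1 hq with hq | hq
              · exact h1 (hq ▸ hpv1)
              · exact ha q hq
            · intro v hvV hvvis q hq
              by_cases hv1 : v ∈ v1
              · exact h1 (hclosed1 v hv1 hvvis q hq)
              · exact hb2 v hvV hv1 q hq

theorem dfs_zero (parents : List (String × List String)) (root : String) (Uu : List String) :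
    DfsOk parents root Uu 0 := by
  intro x vis b V hxU hxv _ hfuel _
  exact absurd hfuel (by have := pvM_pos hxU hxv; omega)

theorem dfs_succ (parents : List (String × List String)) (root : String) (Uu : List String)
    (hU : ∀ x p, p ∈ pvGet parents x → p ∈ Uu)
    (f : Nat) (ha : AnyOk parents root Uu f) : DfsOk parents root Uu (f + 1) := by
  intro x vis b V hxU hxv hroot hfuel heq
  by_cases hxr : x = root
  · rw [show dfsGo parents root (f + 1) x vis = (true, vis) by simp [dfsGo, hxr]] at heq
    cases heq
    exact ⟨fun z hz => hz, hroot, fun _ => hxr ▸ pvReach.base, by intro h; cases h⟩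
  · rw [show dfsGo parents root (f + 1) x vis =
        anyGo parents root f (pvGet parents x) (PySem.Set.add vis x) by simp [dfsGo, hxr]] at heq
    have hadd : ∀ z, z ∈ PySem.Set.add vis x ↔ z = x ∨ z ∈ vis := set_add_mem vis x
    have hvis1_eq : PySem.Set.add vis x = vis ++ [x] := set_add_eq_append hxv
    have hroot1 : root ∉ PySem.Set.add vis x := by
      intro hmem
      rcases (hadd root).1 hmem with h | h
      · exact hxr h.symm
      · exact hroot h
    have hfuel1 : pvM Uu (PySem.Set.add vis x) ≤ f := by
      rw [hvis1_eq]
      have := pvM_add_lt (Uu := Uu) vis hxU hxv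
      omega
    obtain ⟨h1, h2, h3, h4⟩ := ha (pvGet parents x) (PySem.Set.add vis x) b V
      (fun q hq => hU x q hq) hroot1 hfuel1 heq
    have hsub : vis ⊆ V := by
      intro z hz; exact h1 ((hadd z).2 (Or.inr hz))
    refine ⟨hsub, h2, ?_, ?_⟩
    · intro hb
      obtain ⟨q, hq, hr⟩ := h3 hb
      refine pvReach.step x q hxv hq ?_
      refine pvReach_anti parents root ?_ hr
      intro z hz; exact (hadd z).2 (Or.inr hz)
    · intro hb
      obtain ⟨hget, hclosed⟩ := h4 hb
      have hxV : x ∈ V := h1 ((hadd x).2 (Or.inl rfl))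
      refine ⟨hxV, ?_⟩
      intro v hvV hvvis q hq
      by_cases hvx : v = x
      · exact hget q (hvx ▸ hq)
      · refine hclosed v hvV ?_ q hq
        intro hmem
        rcases (hadd v).1 hmem with h | h
        · exact hvx h
        · exact hvvis h

theorem dfsOk_all (parents : List (String × List String)) (root : String) (Uu : List String)
    (hU : ∀ x p, p ∈ pvGet parents x → p ∈ Uu) :
    ∀ f, DfsOk parents root Uu f := by
  intro f
  induction f with
  | zero => exact dfs_zero parents root Uu
  | succ f ih => exact dfs_succ parents root Uu hU f (any_of_dfs parents root Uu f ih)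

-- B's top-level value is reachability of root from node
theorem alt_iff (parents : List (String × List String)) (node root : String) :
    is_descendant_of_alt parents node root = true ↔ pvReach parents root [] node := by
  unfold is_descendant_of_alt
  have hU : ∀ x p, p ∈ pvGet parents x → p ∈ pvUniv parents node :=
    fun x p hp => pvGet_sub_univ parents node hp
  cases hdfs : dfsGo parents root ((pvUniv parents node).length + 1) node [] with
  | mk b V =>
    have hnodeU : node ∈ pvUniv parents node := List.mem_cons_self
    have hfuel : pvM (pvUniv parents node) [] ≤ (pvUniv parents node).length + 1 := by
      have := pvM_le_length (pvUniv parents node) []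
      omega
    obtain ⟨h1, h2, h3, h4⟩ := dfsOk_all parents root (pvUniv parents node) hU
      ((pvUniv parents node).length + 1) node [] b V hnodeU (by simp) (by simp) hfuel hdfs
    simp only
    constructor
    · intro hb; exact h3 hb
    · intro hr
      by_contra hb
      have hbf : b = false := by cases b <;> simp_all
      obtain ⟨hnodeV, hclosed⟩ := h4 hbf
      have hclosed' : ∀ v ∈ V, ∀ p ∈ pvGet parents v, p ∈ V := by
        intro v hv p hp
        exact hclosed v hv (by simp) p hp
      exact (pvReach_closed parents root hclosed' h2 hr) hnodeV

-- A's top-level value is reachability of root from node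
theorem a_iff (parents : List (String × List String)) (node root : String) :
    is_descendant_of parents node root = true ↔ pvReach parents root [] node := by
  unfold is_descendant_of
  have hq : ∀ y ∈ [node], y ∈ pvUniv parents node := by
    intro y hy
    rcases List.mem_cons.1 hy with hy | hy
    · exact hy ▸ List.mem_cons_self
    · cases hy
  have hcl : ∀ v ∈ ([] : List String), ∀ p ∈ pvGet parents v, p ∈ ([] : List String) ∨ p ∈ [node] := by
    intro v hv; cases hv
  have hfuel : ([node] : List String).length +
      (1 + pvS parents) * pvM (pvUniv parents node) [] + 1 ≤
      2 + (1 + pvS parents) * (pvUniv parents node).length := by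
    have hm := pvM_le_length (pvUniv parents node) ([] : List String)
    have := Nat.mul_le_mul_left (1 + pvS parents) hm
    simp only [List.length_cons, List.length_nil]
    omega
  rw [bfsLoop_iff parents root node _ [node] [] hq hcl (by simp) hfuel]
  constructor
  · rintro ⟨y, hy, hr⟩
    rcases List.mem_cons.1 hy with hy | hy
    · exact hy ▸ hr
    · cases hy
  · intro hr
    exact ⟨node, List.mem_cons_self, hr⟩

-- ===== VERDICT (by name: the statement is the Claim_ definition above) =====
theorem is_descendant_of_spec : Claim_equal_is_descendant_of := by
  intro parents node root _
  unfold Spec_is_descendant_of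
  have ha := a_iff parents node root
  have hb := alt_iff parents node root
  cases hA : is_descendant_of parents node root <;>
    cases hB : is_descendant_of_alt parents node root <;> simp_all
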